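-- pv_equiv track=rewrite | github.com/mkitzan/terminus | source/commands.py | script_vars
-- ===== SOURCE A (Python) =====
-- def script_vars(inpt):
--     """Creates a dictionary of script variables and finds script file name."""
--     infile = find_op(inpt, "-S", "--script")
--     var_dict = {}
--     vals = []
--     name = []
--
--     for v in reversed(inpt):
--         if "=" in v:
--             name = v.split("=")
--             vals.insert(0, name[1])
--             var_dict["$"+name[0]] = " ".join(vals)
--             vals = []
--         else:
--             vals.insert(0, v)
--
--     return infile, var_dict
--
-- def find_op(inpt, short, verbose):
--     """Cuts out args stating the operation to perform."""
--     for i in range(len(inpt)):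
--         curr = inpt[i][1:3].upper() if len(inpt[i]) > 2 else inpt[i]
--
--         if (curr == short or curr == verbose) and i+1 < len(inpt):
--             op = inpt[i+1]
--             inpt[i:i+2] = []
--             return op
-- ===== SOURCE B (Python) =====
-- def script_vars(inpt):
--     """Creates a dictionary of script variables and finds script file name.
--
--     Two-pass rewrite: cut the script arg out with an explicit scan, group the
--     remaining tokens forward into (key, values) runs, then fill the dict from
--     the reversed group list so the first forward occurrence of a key wins.
--     Mutates inpt like the original (removes the script flag and its argument).
--     """
--     infile = None
--     for i, tok in enumerate(inpt):
--         if i + 1 < len(inpt) and _script_flag(tok):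
--             infile = inpt[i + 1]
--             del inpt[i:i + 2]
--             break
--     groups = []
--     for tok in inpt:
--         if "=" in tok:
--             parts = tok.split("=")
--             groups.append(("$" + parts[0], [parts[1]]))
--         elif groups:
--             groups[-1][1].append(tok)
--     var_dict = {}
--     for key, vals in reversed(groups):
--         var_dict[key] = " ".join(vals)
--     return infile, var_dict
--
--
-- def _script_flag(tok):
--     curr = tok[1:3].upper() if len(tok) > 2 else tok
--     return curr == "-S" or curr == "--script"
-- ===== Notes on version B (the rewrite author's own statement) =====
-- stated objective: faster
-- what changed: Replaces A's single reversed-iteration loop with mutable (dict, pending-values) state and O(k) front-insertions by a two-pass decomposition: an explicit break-on-first-match scan for the script flag, a forward pass grouping tokens into (key, value-run) pairs using appends, then a reversed fill of the dict so the first forward occurrence of a duplicate key wins.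
import Mathlib
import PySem

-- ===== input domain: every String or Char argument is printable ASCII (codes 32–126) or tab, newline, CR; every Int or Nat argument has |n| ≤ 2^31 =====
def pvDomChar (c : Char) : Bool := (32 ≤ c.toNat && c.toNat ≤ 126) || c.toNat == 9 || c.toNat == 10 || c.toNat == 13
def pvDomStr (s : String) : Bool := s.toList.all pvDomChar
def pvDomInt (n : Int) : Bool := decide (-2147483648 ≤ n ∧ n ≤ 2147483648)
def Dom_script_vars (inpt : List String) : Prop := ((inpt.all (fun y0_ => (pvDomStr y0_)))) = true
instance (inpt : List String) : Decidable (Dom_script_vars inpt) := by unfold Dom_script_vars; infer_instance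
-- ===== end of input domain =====

-- B is a two-pass decomposition (forward grouping by appends, then a reversed fill of the dict) of A's
-- single reversed accumulator loop; equivalence is about the return value (both Pythons also
-- cut the script flag and its argument out of inpt in place, identically).

-- ===== PORT A =====
-- find_op(inpt, "-S", "--script"): index scan; mutation 'inpt[i:i+2] = []' is returned as the residual list
def pvAFind (inpt : List String) (i : Nat) : Option String × List String :=
  if h : i < inpt.length then
    let t := inpt[i]
    let curr := if PySem.Str.len t > 2 then PySem.Str.upper (PySem.Str.slice t (some 1) (some 3)) else t
    if (curr = "-S" ∨ curr = "--script") ∧ i + 1 < inpt.length then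
      (some (inpt.getD (i + 1) ""), inpt.take i ++ inpt.drop (i + 2))
    else pvAFind inpt (i + 1)
  else (none, inpt)
termination_by inpt.length - i

def script_vars (inpt : List String) : Option String × (List (String × String)) :=
  let fr := pvAFind inpt 0
  let res := fr.2.reverse.foldl
    (fun (st : PySem.Dict String String × List String) v =>
      if PySem.Str.isIn "=" v then
        match PySem.Str.split? v "=" with
        | some (n0 :: n1 :: _) => (st.1.insert ("$" ++ n0) (PySem.Str.join " " (n1 :: st.2)), [])
        | _ => st   -- unreachable: "=" in v gives at least two split parts
      else (st.1, v :: st.2))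
    (PySem.Dict.empty, [])
  (fr.1, res.1.items)

-- ===== PORT B =====
def pvBFlag (tok : String) : Bool :=
  let curr := if PySem.Str.len tok > 2 then PySem.Str.upper (PySem.Str.slice tok (some 1) (some 3)) else tok
  curr == "-S" || curr == "--script"

-- the break-on-first-match scan with 'del inpt[i:i+2]'; returns (infile, residual list)
def pvBFind : List String → Option String × List String
  | [] => (none, [])
  | [t] => (none, [t])
  | t :: nxt :: rest =>
    if pvBFlag t then (some nxt, rest)
    else
      let pr := pvBFind (nxt :: rest)
      (pr.1, t :: pr.2)

def script_vars_alt (inpt : List String) : Option String × (List (String × String)) :=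
  let pr := pvBFind inpt
  let groups := pr.2.foldl
    (fun (gs : List (String × List String)) tok =>
      if PySem.Str.isIn "=" tok then
        match PySem.Str.split? tok "=" with
        | some parts =>
          match parts with
          | p0 :: p1 :: _ => gs ++ [("$" ++ p0, [p1])]
          | [_p0] => gs   -- unreachable: "=" in tok gives at least two split parts
          | [] => gs
        | none => gs
      else
        match gs.getLast? with
        | some g => gs.dropLast ++ [(g.1, g.2 ++ [tok])]
        | none => gs)
    []
  let var_dict := groups.reverse.foldl
    (fun (d : PySem.Dict String String) g => d.insert g.1 (PySem.Str.join " " g.2))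
    PySem.Dict.empty
  (pr.1, var_dict.items)

-- ===== PRECONDITION & SPEC =====
def Spec_script_vars (inpt : List String) (out : Option String × (List (String × String))) : Prop := out = script_vars_alt inpt
instance (inpt : List String) (out : Option String × (List (String × String))) : Decidable (Spec_script_vars inpt out) := by unfold Spec_script_vars; infer_instance

-- ===== CLAIM (what is proved, stated in full; the proofs are below) =====
def Claim_equal_script_vars : Prop := ∀ (inpt : List String), Dom_script_vars inpt → Spec_script_vars inpt (script_vars inpt)

-- ===== LEMMAS AND PROOFS =====

-- proof-side names for the two step functions (definitionally the port lambdas)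
def pvStepA (st : PySem.Dict String String × List String) (v : String) : PySem.Dict String String × List String :=
  if PySem.Str.isIn "=" v then
    match PySem.Str.split? v "=" with
    | some (n0 :: n1 :: _) => (st.1.insert ("$" ++ n0) (PySem.Str.join " " (n1 :: st.2)), [])
    | _ => st
  else (st.1, v :: st.2)

def pvStepB (gs : List (String × List String)) (tok : String) : List (String × List String) :=
  if PySem.Str.isIn "=" tok then
    match PySem.Str.split? tok "=" with
    | some parts =>
      match parts with
      | p0 :: p1 :: _ => gs ++ [("$" ++ p0, [p1])]
      | [_p0] => gs
      | [] => gs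
    | none => gs
  else
    match gs.getLast? with
    | some g => gs.dropLast ++ [(g.1, g.2 ++ [tok])]
    | none => gs

def pvIns (g : String × List String) (d : PySem.Dict String String) : PySem.Dict String String :=
  d.insert g.1 (PySem.Str.join " " g.2)

-- pending values a residual list contributes to the group before it
def pvLead : List String → List String
  | [] => []
  | v :: l =>
    if PySem.Str.isIn "=" v then
      match PySem.Str.split? v "=" with
      | some (_ :: _ :: _) => []
      | _ => pvLead l
    else v :: pvLead l

-- the forward group list
def pvGro : List String → List (String × List String)
  | [] => []
  | v :: l =>
    if PySem.Str.isIn "=" v then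
      match PySem.Str.split? v "=" with
      | some (p0 :: p1 :: _) => ("$" ++ p0, p1 :: pvLead l) :: pvGro l
      | _ => pvGro l
    else pvGro l

theorem pvFind_eq (l pre : List String) :
    pvAFind (pre ++ l) pre.length = ((pvBFind l).1, pre ++ (pvBFind l).2) := by
  induction l generalizing pre with
  | nil =>
    rw [pvAFind]
    simp [pvBFind]
  | cons t l' ih =>
    cases l' with
    | nil =>
      rw [pvAFind]
      have h1 : pre.length < (pre ++ [t]).length := by simp
      rw [dif_pos h1]
      have hcond : ¬ (((if PySem.Str.len (pre ++ [t])[pre.length] > 2 then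
            PySem.Str.upper (PySem.Str.slice (pre ++ [t])[pre.length] (some 1) (some 3))
          else (pre ++ [t])[pre.length]) = "-S" ∨
          (if PySem.Str.len (pre ++ [t])[pre.length] > 2 then
            PySem.Str.upper (PySem.Str.slice (pre ++ [t])[pre.length] (some 1) (some 3))
          else (pre ++ [t])[pre.length]) = "--script") ∧
          pre.length + 1 < (pre ++ [t]).length) := by
        simp
      simp only [if_neg hcond]
      rw [pvAFind]
      have h2 : ¬ (pre.length + 1 < (pre ++ [t]).length) := by simp
      rw [dif_neg h2]
      simp [pvBFind]
    | cons nxt rest =>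
      rw [pvAFind]
      have h1 : pre.length < (pre ++ t :: nxt :: rest).length := by simp
      rw [dif_pos h1]
      have hget : (pre ++ t :: nxt :: rest)[pre.length]'h1 = t := by
        rw [List.getElem_append_right (Nat.le_refl _)]
        simp
      by_cases hb : pvBFlag t = true
      · have hcond : (((if PySem.Str.len (pre ++ t :: nxt :: rest)[pre.length] > 2 then
              PySem.Str.upper (PySem.Str.slice (pre ++ t :: nxt :: rest)[pre.length] (some 1) (some 3))
            else (pre ++ t :: nxt :: rest)[pre.length]) = "-S" ∨
            (if PySem.Str.len (pre ++ t :: nxt :: rest)[pre.length] > 2 then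
              PySem.Str.upper (PySem.Str.slice (pre ++ t :: nxt :: rest)[pre.length] (some 1) (some 3))
            else (pre ++ t :: nxt :: rest)[pre.length]) = "--script") ∧
            pre.length + 1 < (pre ++ t :: nxt :: rest).length) := by
          rw [hget]
          simp only [pvBFlag] at hb
          refine ⟨by simpa using hb, by simp⟩
        rw [if_pos hcond]
        have hgd : (pre ++ t :: nxt :: rest).getD (pre.length + 1) "" = nxt := by
          simp [List.getD]
        have htake : (pre ++ t :: nxt :: rest).take pre.length = pre := by simp
        have hdrop : (pre ++ t :: nxt :: rest).drop (pre.length + 2) = rest := by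
          rw [show pre.length + 2 = (pre ++ [t, nxt]).length by simp,
              show pre ++ t :: nxt :: rest = (pre ++ [t, nxt]) ++ rest by simp,
              List.drop_left]
        rw [hgd, htake, hdrop]
        simp [pvBFind, hb]
      · have hcond : ¬ (((if PySem.Str.len (pre ++ t :: nxt :: rest)[pre.length] > 2 then
              PySem.Str.upper (PySem.Str.slice (pre ++ t :: nxt :: rest)[pre.length] (some 1) (some 3))
            else (pre ++ t :: nxt :: rest)[pre.length]) = "-S" ∨
            (if PySem.Str.len (pre ++ t :: nxt :: rest)[pre.length] > 2 then
              PySem.Str.upper (PySem.Str.slice (pre ++ t :: nxt :: rest)[pre.length] (some 1) (some 3))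
            else (pre ++ t :: nxt :: rest)[pre.length]) = "--script") ∧
            pre.length + 1 < (pre ++ t :: nxt :: rest).length) := by
          rw [hget]
          intro hc
          apply hb
          simp only [pvBFlag]
          simpa using hc.1
        rw [if_neg hcond]
        have hre : pre ++ t :: nxt :: rest = (pre ++ [t]) ++ (nxt :: rest) := by simp
        have hlen : pre.length + 1 = (pre ++ [t]).length := by simp
        rw [hre, hlen, ih (pre ++ [t])]
        simp [pvBFind, hb]

theorem pvGroups_eq_invariant (l : List String) (gs : List (String × List String)) (k : String) (vs : List String) :
    List.foldl pvStepB (gs ++ [(k, vs)]) l = gs ++ [(k, vs ++ pvLead l)] ++ pvGro l := by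
  induction l generalizing gs k vs with
  | nil => simp [pvLead, pvGro]
  | cons v l' ih =>
    rw [List.foldl_cons]
    by_cases hIn : PySem.Str.isIn "=" v = true
    all_goals simp at hIn
    · cases hs : PySem.Str.split? v "=" with
      | none =>
        have hstep : pvStepB (gs ++ [(k, vs)]) v = gs ++ [(k, vs)] := by
          simp [pvStepB, hIn, hs]
        rw [hstep, ih]
        simp [pvLead, pvGro, hIn, hs]
      | some parts =>
        match parts with
        | [] =>
          have hstep : pvStepB (gs ++ [(k, vs)]) v = gs ++ [(k, vs)] := by
            simp [pvStepB, hIn, hs]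
          rw [hstep, ih]
          simp [pvLead, pvGro, hIn, hs]
        | [p0] =>
          have hstep : pvStepB (gs ++ [(k, vs)]) v = gs ++ [(k, vs)] := by
            simp [pvStepB, hIn, hs]
          rw [hstep, ih]
          simp [pvLead, pvGro, hIn, hs]
        | p0 :: p1 :: ps =>
          have hstep : pvStepB (gs ++ [(k, vs)]) v = (gs ++ [(k, vs)]) ++ [("$" ++ p0, [p1])] := by
            simp [pvStepB, hIn, hs]
          rw [hstep, ih]
          simp [pvLead, pvGro, hIn, hs]
    · have hstep : pvStepB (gs ++ [(k, vs)]) v = gs ++ [(k, vs ++ [v])] := by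
        simp [pvStepB, hIn]
      rw [hstep, ih]
      simp [pvLead, pvGro, hIn]

theorem pvGroups_eq (l : List String) : List.foldl pvStepB [] l = pvGro l := by
  induction l with
  | nil => rfl
  | cons v l' ih =>
    rw [List.foldl_cons]
    by_cases hIn : PySem.Str.isIn "=" v = true
    all_goals simp at hIn
    · cases hs : PySem.Str.split? v "=" with
      | none =>
        have hstep : pvStepB [] v = [] := by simp [pvStepB, hIn, hs]
        rw [hstep, ih]
        simp [pvGro, hIn, hs]
      | some parts =>
        match parts with
        | [] =>
          have hstep : pvStepB [] v = [] := by simp [pvStepB, hIn, hs]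
          rw [hstep, ih]
          simp [pvGro, hIn, hs]
        | [p0] =>
          have hstep : pvStepB [] v = [] := by simp [pvStepB, hIn, hs]
          rw [hstep, ih]
          simp [pvGro, hIn, hs]
        | p0 :: p1 :: ps =>
          have hstep : pvStepB [] v = [] ++ [("$" ++ p0, [p1])] := by
            simp [pvStepB, hIn, hs]
          rw [hstep, pvGroups_eq_invariant]
          simp [pvGro, hIn, hs]
    · have hstep : pvStepB [] v = [] := by simp [pvStepB, hIn]
      rw [hstep, ih]
      simp [pvGro, hIn]

theorem pvFoldrA_eq (l : List String) :
    List.foldr (fun v st => pvStepA st v) (PySem.Dict.empty, []) l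
      = (List.foldr pvIns PySem.Dict.empty (pvGro l), pvLead l) := by
  induction l with
  | nil => rfl
  | cons v l' ih =>
    rw [List.foldr_cons, ih]
    by_cases hIn : PySem.Str.isIn "=" v = true
    all_goals simp at hIn
    · cases hs : PySem.Str.split? v "=" with
      | none =>
        have hstep : ∀ st : PySem.Dict String String × List String, pvStepA st v = st := by
          intro st; simp [pvStepA, hIn, hs]
        rw [hstep]
        simp [pvLead, pvGro, hIn, hs]
      | some parts =>
        match parts with
        | [] =>
          have hstep : ∀ st : PySem.Dict String String × List String, pvStepA st v = st := by
            intro st; simp [pvStepA, hIn, hs]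
          rw [hstep]
          simp [pvLead, pvGro, hIn, hs]
        | [p0] =>
          have hstep : ∀ st : PySem.Dict String String × List String, pvStepA st v = st := by
            intro st; simp [pvStepA, hIn, hs]
          rw [hstep]
          simp [pvLead, pvGro, hIn, hs]
        | p0 :: p1 :: ps =>
          have hstep : ∀ st : PySem.Dict String String × List String,
              pvStepA st v = (st.1.insert ("$" ++ p0) (PySem.Str.join " " (p1 :: st.2)), []) := by
            intro st; simp [pvStepA, hIn, hs]
          rw [hstep]
          simp [pvLead, pvGro, pvIns, hIn, hs]
    · have hstep : ∀ st : PySem.Dict String String × List String,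
          pvStepA st v = (st.1, v :: st.2) := by
        intro st; simp [pvStepA, hIn]
      rw [hstep]
      simp [pvLead, pvGro, hIn]

-- ===== VERDICT (by name: the statement is the Claim_ definition above) =====
theorem script_vars_spec : Claim_equal_script_vars := by
  intro inpt _
  show _ = _
  unfold script_vars script_vars_alt
  have hf := pvFind_eq inpt []
  simp only [List.nil_append, List.length_nil] at hf
  rw [hf]
  simp only
  rw [show (List.foldl (fun (st : PySem.Dict String String × List String) v =>
      if PySem.Str.isIn "=" v then
        match PySem.Str.split? v "=" with
        | some (n0 :: n1 :: _) => (st.1.insert ("$" ++ n0) (PySem.Str.join " " (n1 :: st.2)), [])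
        | _ => st
      else (st.1, v :: st.2)) = List.foldl pvStepA) from rfl]
  rw [show (List.foldl (fun (gs : List (String × List String)) tok =>
      if PySem.Str.isIn "=" tok then
        match PySem.Str.split? tok "=" with
        | some parts =>
          match parts with
          | p0 :: p1 :: _ => gs ++ [("$" ++ p0, [p1])]
          | [_p0] => gs
          | [] => gs
        | none => gs
      else
        match gs.getLast? with
        | some g => gs.dropLast ++ [(g.1, g.2 ++ [tok])]
        | none => gs) = List.foldl pvStepB) from rfl]
  rw [show (fun (d : PySem.Dict String String) (g : String × List String) => d.insert g.1 (PySem.Str.join " " g.2)) = fun d g => pvIns g d from rfl]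
  rw [List.foldl_reverse, List.foldl_reverse, pvGroups_eq, pvFoldrA_eq]
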